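-- pv_equiv track=rewrite | github.com/bit-cook/RD-Agent | rdagent/scenarios/rl/autorl_bench/tasks/alfworld/eval.py | _match_action
-- ===== SOURCE A (Python) =====
-- from typing import Any, Dict, List
--
-- def _match_action(action: str, admissible: List[str]) -> str:
--     """匹配合法动作"""
--     action = action.strip().lower()
--
--     for a in admissible:
--         if a.lower() == action:
--             return a
--
--     for a in admissible:
--         if a.lower().startswith(action) or action.startswith(a.lower()):
--             return a
--
--     return admissible[0] if admissible else "look"
-- ===== SOURCE B (Python) =====
-- from typing import Any, Dict, List
--
-- def _rank(action: str, a: str) -> int: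
--     """0 = exact lowercase match, 1 = one-way prefix match, 2 = no match."""
--     al = a.lower()
--     if al == action:
--         return 0
--     if al.startswith(action) or action.startswith(al):
--         return 1
--     return 2
--
-- def _match_action(action: str, admissible: List[str]) -> str:
--     """Rank every candidate once, then select the best-ranked earliest one.
--
--     Exact match beats prefix match, earlier beats later: that is exactly the
--     lexicographic minimum of (rank, index).  (An exact match also satisfies the
--     prefix test, so ranking is a refinement of A's two sequential scans.)
--     """
--     action = action.strip().lower()
--     ranked = [(_rank(action, a), i, a) for i, a in enumerate(admissible)]
--     good = [p for p in ranked if p[0] < 2]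
--     if good:
--         return min(good)[2]
--     return admissible[0] if admissible else "look"
-- ===== Notes on version B (the rewrite author's own statement) =====
-- stated objective: alternative
-- what changed: Replaces A's two sequential scans (exact pass, then prefix pass) with a rank-and-select algorithm: one enumerate pass assigns each candidate a rank (0 exact, 1 prefix, 2 none) and the answer is the lexicographic minimum of the (rank, index) pairs among ranks < 2, falling back as A does.
import Mathlib
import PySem

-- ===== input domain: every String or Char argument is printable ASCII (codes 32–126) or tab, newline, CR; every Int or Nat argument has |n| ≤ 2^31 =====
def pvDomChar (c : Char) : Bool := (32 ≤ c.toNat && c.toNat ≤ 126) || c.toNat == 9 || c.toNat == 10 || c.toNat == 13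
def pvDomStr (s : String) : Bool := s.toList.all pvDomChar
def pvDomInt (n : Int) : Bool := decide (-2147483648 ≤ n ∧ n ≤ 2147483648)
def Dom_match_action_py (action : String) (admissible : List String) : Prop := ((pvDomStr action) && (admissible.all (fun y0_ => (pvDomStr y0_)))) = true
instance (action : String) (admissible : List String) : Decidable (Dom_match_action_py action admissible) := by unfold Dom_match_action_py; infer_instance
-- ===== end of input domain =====

-- B replaces A's two sequential scans by a rank-and-select algorithm (lexicographic minimum of (rank, index)); objective: alternative (same cost).

-- ===== PORT A =====
-- first loop of A: first element whose lowercase equals action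
def pvLoopExact (act : String) : List String → Option String
  | [] => none
  | a :: rest => if PySem.Str.lower a == act then some a else pvLoopExact act rest

-- second loop of A: first element satisfying the two-way startswith test
def pvLoopPrefix (act : String) : List String → Option String
  | [] => none
  | a :: rest =>
      if PySem.Str.startswith (PySem.Str.lower a) act || PySem.Str.startswith act (PySem.Str.lower a)
      then some a else pvLoopPrefix act rest

def match_action_py (action : String) (admissible : List String) : String :=
  match pvLoopExact (PySem.Str.lower (PySem.Str.strip action)) admissible with
  | some a => a
  | none =>
    match pvLoopPrefix (PySem.Str.lower (PySem.Str.strip action)) admissible with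
    | some a => a
    | none => match admissible with
              | [] => "look"
              | h :: _ => h

-- ===== PORT B =====
-- Source B's _rank: 0 = exact lowercase match, 1 = one-way prefix match, 2 = no match
def pvRank (act a : String) : Nat :=
  if PySem.Str.lower a == act then 0
  else if PySem.Str.startswith (PySem.Str.lower a) act || PySem.Str.startswith act (PySem.Str.lower a)
  then 1 else 2

-- Source B's `min(good)`: Python's min keeps the first minimal tuple; the indices (second
-- components) are pairwise distinct, so comparing (rank, index) lexicographically and
-- keeping the earlier element on equality is exact (the third component never decides).
def pvMinLex (best : Nat × Int × String) : List (Nat × Int × String) → Nat × Int × String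
  | [] => best
  | p :: rest =>
      if p.1 < best.1 ∨ (p.1 = best.1 ∧ p.2.1 < best.2.1)
      then pvMinLex p rest else pvMinLex best rest

def match_action_py_alt (action : String) (admissible : List String) : String :=
  let act := PySem.Str.lower (PySem.Str.strip action)
  let ranked := (PySem.List.enumerate admissible 0).map (fun p => (pvRank act p.2, p.1, p.2))
  let good := ranked.filter (fun p => decide (p.1 < 2))
  match good with
  | h :: t => (pvMinLex h t).2.2
  | [] => match admissible with
          | [] => "look"
          | h :: _ => h

-- ===== PRECONDITION & SPEC =====
def Spec_match_action_py (action : String) (admissible : List String) (out : String) : Prop := out = match_action_py_alt action admissible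
instance (action : String) (admissible : List String) (out : String) : Decidable (Spec_match_action_py action admissible out) := by unfold Spec_match_action_py; infer_instance

-- ===== CLAIM (what is proved, stated in full; the proofs are below) =====
def Claim_equal_match_action_py : Prop := ∀ (action : String) (admissible : List String), Dom_match_action_py action admissible → Spec_match_action_py action admissible (match_action_py action admissible)

-- ===== LEMMAS AND PROOFS =====

-- B's final selection step, abstracted over the good list (for case analysis in the proof)
def pvSelect (admissible : List String) (good : List (Nat × Int × String)) : String :=
  match good with
  | h :: t => (pvMinLex h t).2.2
  | [] => match admissible with
          | [] => "look"
          | h :: _ => h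

-- the ranked-and-filtered list B builds, with an arbitrary enumerate offset (for induction)
def pvGood (act : String) (s : Int) (l : List String) : List (Nat × Int × String) :=
  ((PySem.List.enumerate l s).map (fun p => (pvRank act p.2, p.1, p.2))).filter (fun p => decide (p.1 < 2))

theorem pvGood_cons (act : String) (s : Int) (a : String) (l : List String) :
    pvGood act s (a :: l) =
      if pvRank act a < 2 then (pvRank act a, s, a) :: pvGood act (s + 1) l else pvGood act (s + 1) l := by
  by_cases h : pvRank act a < 2
  · have h' : decide (pvRank act a ≤ 1) = true := by simp; omega
    simp [pvGood, PySem.List.enumerate_cons, h, h']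
  · have h' : decide (pvRank act a ≤ 1) = false := by simp; omega
    simp [pvGood, PySem.List.enumerate_cons, h, h']

theorem pvGood_ranks (act : String) (s : Int) (l : List String) :
    ∀ p ∈ pvGood act s l, p.1 ≤ 1 := by
  intro p hp
  have := (List.mem_filter.mp hp).2
  simp at this
  omega

theorem pvGood_pairwise (act : String) (s : Int) (l : List String) :
    (pvGood act s l).Pairwise (fun p q => p.2.1 < q.2.1) := by
  refine List.Pairwise.sublist List.filter_sublist ?_
  rw [List.pairwise_map]
  exact (PySem.List.pairwise_lt_enumerate l s).imp (fun h => by simpa using h)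

theorem pvMinLex_stay : ∀ (rest : List (Nat × Int × String)) (best : Nat × Int × String),
    (∀ p ∈ rest, ¬(p.1 < best.1 ∨ (p.1 = best.1 ∧ p.2.1 < best.2.1))) → pvMinLex best rest = best := by
  intro rest
  induction rest with
  | nil => intro best _; rfl
  | cons p rest ih =>
    intro best h
    have hp := h p (by simp)
    simp only [pvMinLex, if_neg hp]
    exact ih best (fun q hq => h q (by simp [hq]))

theorem pvMinLex_char : ∀ (rest : List (Nat × Int × String)) (best : Nat × Int × String),
    (best :: rest).Pairwise (fun p q => p.2.1 < q.2.1) →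
    (∀ p ∈ best :: rest, p.1 ≤ 1) →
    pvMinLex best rest = ((best :: rest).find? (fun p => p.1 == 0)).getD best := by
  intro rest
  induction rest with
  | nil =>
    intro best _ _
    by_cases h : best.1 = 0
    · simp [pvMinLex, List.find?, h]
    · have hf : (best.1 == 0) = false := by simp [h]
      simp [pvMinLex, List.find?, hf]
  | cons p rest ih =>
    intro best hpw hrk
    have hidx : best.2.1 < p.2.1 := (List.pairwise_cons.mp hpw).1 p (by simp)
    by_cases hb0 : best.1 = 0
    · -- best already exact: never replaced
      have hstay : pvMinLex best (p :: rest) = best := by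
        apply pvMinLex_stay (p :: rest) best
        intro q hq
        have hq1 : q.1 ≤ 1 := hrk q (by simp [hq])
        have hqidx : best.2.1 < q.2.1 := (List.pairwise_cons.mp hpw).1 q hq
        rw [hb0]; omega
      rw [hstay]
      simp [List.find?, hb0]
    · have hb1 : best.1 = 1 := by have := hrk best (by simp); omega
      by_cases hp0 : p.1 = 0
      · -- head of rest is exact: replace and it stays
        have hcond : p.1 < best.1 ∨ (p.1 = best.1 ∧ p.2.1 < best.2.1) := by left; omega
        simp only [pvMinLex, if_pos hcond]
        have hstay : pvMinLex p rest = p := by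
          apply pvMinLex_stay rest p
          intro q hq
          have hq1 : q.1 ≤ 1 := hrk q (by simp [hq])
          have hqidx : p.2.1 < q.2.1 :=
            ((List.pairwise_cons.mp (List.pairwise_cons.mp hpw).2).1) q hq
          rw [hp0]; omega
        rw [hstay]
        have : (best.1 == 0) = false := by simp [hb0]
        simp [List.find?, this, hp0]
      · -- head of rest rank 1 with a later index: keep best, recurse
        have hp1 : p.1 = 1 := by have := hrk p (by simp); omega
        have hcond : ¬(p.1 < best.1 ∨ (p.1 = best.1 ∧ p.2.1 < best.2.1)) := by
          rw [hb1, hp1]; omega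
        simp only [pvMinLex, if_neg hcond]
        have hpw' : (best :: rest).Pairwise (fun p q => p.2.1 < q.2.1) := by
          refine List.pairwise_cons.mpr ⟨?_, (List.pairwise_cons.mp (List.pairwise_cons.mp hpw).2).2⟩
          intro q hq
          exact (List.pairwise_cons.mp hpw).1 q (by simp [hq])
        rw [ih best hpw' (fun q hq => by
          rcases List.mem_cons.mp hq with h | h
          · exact hrk q (by simp [h])
          · exact hrk q (by simp [h]))]
        have hbf : (best.1 == 0) = false := by simp [hb0]
        have hpf : (p.1 == 0) = false := by simp [hp0]
        simp [List.find?, hbf, hpf]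

-- the exact-rank element of B's good list is exactly A's first exact match
theorem pvGood_find0 (act : String) : ∀ (l : List String) (s : Int),
    ((pvGood act s l).find? (fun p => p.1 == 0)).map (fun p => p.2.2) = pvLoopExact act l := by
  intro l
  induction l with
  | nil => intro s; simp [pvGood, PySem.List.enumerate_nil, pvLoopExact]
  | cons a l ih =>
    intro s
    rw [pvGood_cons]
    by_cases he : (PySem.Str.lower a == act) = true
    · have hr : pvRank act a = 0 := by simp only [pvRank, if_pos he]
      simp [hr, pvLoopExact, he]
    · simp only [pvLoopExact, if_neg he]
      by_cases hp : (PySem.Str.startswith (PySem.Str.lower a) act || PySem.Str.startswith act (PySem.Str.lower a)) = true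
      · have hr : pvRank act a = 1 := by simp only [pvRank, if_neg he, if_pos hp]
        simp only [hr]
        rw [if_pos (by omega)]
        simp only [List.find?]
        exact ih (s + 1)
      · have hr : pvRank act a = 2 := by simp only [pvRank, if_neg he, if_neg hp]
        simp only [hr]
        rw [if_neg (by omega)]
        exact ih (s + 1)

-- when no exact match exists, the head of B's good list is exactly A's first prefix match
theorem pvGood_head (act : String) : ∀ (l : List String) (s : Int),
    pvLoopExact act l = none →
    (pvGood act s l).head?.map (fun p => p.2.2) = pvLoopPrefix act l := by
  intro l
  induction l with
  | nil => intro s _; simp [pvGood, PySem.List.enumerate_nil, pvLoopPrefix]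
  | cons a l ih =>
    intro s hex
    have he : ¬((PySem.Str.lower a == act) = true) := by
      intro h; simp [pvLoopExact, h] at hex
    have hex' : pvLoopExact act l = none := by
      simp only [pvLoopExact, if_neg he] at hex; exact hex
    rw [pvGood_cons]
    by_cases hp : (PySem.Str.startswith (PySem.Str.lower a) act || PySem.Str.startswith act (PySem.Str.lower a)) = true
    · have hr : pvRank act a = 1 := by simp only [pvRank, if_neg he, if_pos hp]
      simp only [hr]
      rw [if_pos (by omega)]
      simp only [pvLoopPrefix, if_pos hp, List.head?, Option.map]
    · have hr : pvRank act a = 2 := by simp only [pvRank, if_neg he, if_neg hp]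
      simp only [hr]
      rw [if_neg (by omega)]
      rw [ih (s + 1) hex']
      simp only [pvLoopPrefix, if_neg hp]

-- ===== VERDICT (by name: the statement is the Claim_ definition above) =====
theorem match_action_py_spec : Claim_equal_match_action_py := by
  intro action admissible _
  unfold Spec_match_action_py
  have halt : match_action_py_alt action admissible =
      pvSelect admissible (pvGood (PySem.Str.lower (PySem.Str.strip action)) 0 admissible) := rfl
  rw [halt]
  unfold match_action_py
  set act := PySem.Str.lower (PySem.Str.strip action) with hact
  cases hg : pvGood act 0 admissible with
  | nil =>
    have hex : pvLoopExact act admissible = none := by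
      have := pvGood_find0 act admissible 0
      rw [hg] at this
      simpa using this.symm
    have hpf : pvLoopPrefix act admissible = none := by
      have := pvGood_head act admissible 0 hex
      rw [hg] at this
      simpa using this.symm
    rw [hex, hpf]
    rfl
  | cons h t =>
    have hpw := pvGood_pairwise act 0 admissible
    have hrk := pvGood_ranks act 0 admissible
    rw [hg] at hpw hrk
    simp only [pvSelect]
    rw [pvMinLex_char t h hpw hrk]
    cases hex : pvLoopExact act admissible with
    | some b =>
      have hfind := pvGood_find0 act admissible 0
      rw [hg, hex] at hfind
      cases hf : (h :: t).find? (fun p => p.1 == 0) with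
      | none => rw [hf] at hfind; simp at hfind
      | some p =>
        rw [hf] at hfind
        simp at hfind
        simp [hfind]
    | none =>
      have hfind := pvGood_find0 act admissible 0
      rw [hg, hex] at hfind
      have hf : (h :: t).find? (fun p => p.1 == 0) = none := by
        cases hf : (h :: t).find? (fun p => p.1 == 0) with
        | none => rfl
        | some p => rw [hf] at hfind; simp at hfind
      have hpf := pvGood_head act admissible 0 hex
      rw [hg] at hpf
      simp only [List.head?] at hpf
      rw [hf, ← hpf]
      rfl
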